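-- pv_equiv track=rewrite | github.com/eddsolves/advent-of-code | 2024/day_09.py | compress_by_file
-- ===== SOURCE A (Python) =====
-- def compress_by_file(file_blocks):
--
--     for i, block in enumerate(file_blocks[::-1]):
--         block = block[0]
--
--         if "." in block:
--             continue
--
--         for j, _block in enumerate(file_blocks):
--             _block = _block[0]
--
--             if len(_block) >= len(block) and "." in _block:
--                 file_blocks[j] = [block]
--                 break
--
--     return file_blocks
-- ===== SOURCE B (Python) =====
-- def compress_by_file(file_blocks):
--     # Bucket the free slots by capacity once (dict capacity -> ascending index list);
--     # for each file (right to left) the target is the minimum head over buckets of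
--     # sufficient capacity, so the disk list is never rescanned per file.
--     # Like A, the list passed in is updated in place and returned.
--     free = [(len(b[0]), j) for j, b in enumerate(file_blocks) if "." in b[0]]
--     buckets = {}
--     for cap, j in free:
--         buckets.setdefault(cap, []).append(j)
--     for blk in file_blocks[::-1]:
--         s = blk[0]
--         if "." in s:
--             continue
--         n = len(s)
--         best = None
--         best_cap = None
--         for cap, idxs in buckets.items():
--             if cap >= n and idxs and (best is None or idxs[0] < best):
--                 best = idxs[0]
--                 best_cap = cap
--         if best is not None:
--             buckets[best_cap].pop(0)
--             file_blocks[best] = [s]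
--     return file_blocks
-- ===== Notes on version B (the rewrite author's own statement) =====
-- stated objective: alternative
-- what changed: B replaces A's per-file forward rescan of the (mutated) disk list by a dict bucketing free-slot indices per capacity, built once; each file's target is the minimum head over buckets of sufficient capacity, and the chosen bucket head is popped.
import Mathlib
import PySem

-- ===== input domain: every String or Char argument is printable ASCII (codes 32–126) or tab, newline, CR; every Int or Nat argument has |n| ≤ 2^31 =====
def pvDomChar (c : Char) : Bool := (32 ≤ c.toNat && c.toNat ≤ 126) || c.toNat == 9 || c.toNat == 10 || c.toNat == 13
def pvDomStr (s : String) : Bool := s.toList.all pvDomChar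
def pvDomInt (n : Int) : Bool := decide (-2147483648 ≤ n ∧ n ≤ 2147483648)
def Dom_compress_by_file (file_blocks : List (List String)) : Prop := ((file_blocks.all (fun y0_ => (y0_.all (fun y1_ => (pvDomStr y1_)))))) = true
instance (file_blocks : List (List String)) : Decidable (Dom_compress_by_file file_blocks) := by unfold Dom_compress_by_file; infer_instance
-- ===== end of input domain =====

-- B buckets the free slots by capacity in a dict and answers each "leftmost fitting slot"
-- query as a minimum over bucket heads, instead of A's per-file rescan of the disk list
-- (objective: alternative data structure). Both Pythons mutate the argument list in place
-- identically; the equivalence proved is about the return value.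

-- ===== PORT A =====

-- block[0] ; the none case (empty inner list) is an IndexError, excluded by Pre_
def pvHead0 (b : List String) : String := (PySem.List.pyGet? b 0).getD ""

-- '"." in s'
def pvHasDot (s : String) : Bool := PySem.Str.isIn "." s

-- the inner 'for j, _block in enumerate(file_blocks): … file_blocks[j] = [block]; break'
def pvPlaceA (bs : List (List String)) (s : String) : List (List String) :=
  match bs with
  | [] => []
  | b :: rest =>
      if (decide (PySem.Str.len s ≤ PySem.Str.len (pvHead0 b)) && pvHasDot (pvHead0 b)) then
        [s] :: rest
      else
        b :: pvPlaceA rest s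

def compress_by_file (file_blocks : List (List String)) : List (List String) :=
  -- for i, block in enumerate(file_blocks[::-1]): … (i unused; the snapshot is taken once)
  (((PySem.List.slice? file_blocks none none (-1)).getD [])).foldl
    (fun cur blk =>
      let s := pvHead0 blk
      if pvHasDot s then cur else pvPlaceA cur s)
    file_blocks

-- ===== PORT B =====

-- 'for cap, idxs in buckets.items(): if cap >= n and idxs and (best is None or idxs[0] < best): best, best_cap = idxs[0], cap'
-- best state is (best, best_cap)
def pvBestB (items : List (Int × List Int)) (n : Int) (best : Option (Int × Int)) : Option (Int × Int) :=
  match items with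
  | [] => best
  | (cap, idxs) :: rest =>
      match idxs with
      | [] => pvBestB rest n best
      | h :: _ =>
          if (decide (n ≤ cap) && (match best with | none => true | some b => decide (h < b.1))) then
            pvBestB rest n (some (h, cap))
          else
            pvBestB rest n best

def compress_by_file_alt (file_blocks : List (List String)) : List (List String) :=
  -- free = [(len(b[0]), j) for j, b in enumerate(file_blocks) if "." in b[0]]
  let free : List (Int × Int) :=
    (PySem.List.enumerate file_blocks 0).filterMap
      (fun p => if pvHasDot (pvHead0 p.2) then some (PySem.Str.len (pvHead0 p.2), p.1) else none)
  -- buckets.setdefault(cap, []).append(j)  ==  buckets[cap] = buckets.get(cap, []) + [j]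
  let buckets0 : PySem.Dict Int (List Int) :=
    free.foldl (fun d p => d.modify p.1 [] (fun l => l ++ [p.2])) PySem.Dict.empty
  let st :=
    (((PySem.List.slice? file_blocks none none (-1)).getD [])).foldl
      (fun (st : PySem.Dict Int (List Int) × List (List String)) blk =>
        let s := pvHead0 blk
        if pvHasDot s then st
        else
          match pvBestB st.1.items (PySem.Str.len s) none with
          | none => st
          -- buckets[best_cap].pop(0); file_blocks[best] = [s]  (best ≥ 0: it comes from enumerate)
          | some (j, c) => (st.1.modify c [] (fun l => l.drop 1), PySem.List.pySetD st.2 j [s]))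
      (buckets0, file_blocks)
  st.2

-- ===== PRECONDITION & SPEC =====
-- Pre_ excludes exactly the inputs on which Python A raises IndexError: an empty inner list
-- makes 'block[0]' fail.
def Pre_compress_by_file (file_blocks : List (List String)) : Prop :=
  ∀ b ∈ file_blocks, b ≠ []
instance (file_blocks : List (List String)) : Decidable (Pre_compress_by_file file_blocks) := by
  unfold Pre_compress_by_file; infer_instance

def pvWitness_compress_by_file : List (List String) := [["ab"], ["..."], ["c"]]

def Spec_compress_by_file (file_blocks : List (List String)) (out : List (List String)) : Prop := out = compress_by_file_alt file_blocks
instance (file_blocks : List (List String)) (out : List (List String)) : Decidable (Spec_compress_by_file file_blocks out) := by unfold Spec_compress_by_file; infer_instance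

-- ===== CLAIM (what is proved, stated in full; the proofs are below) =====
def Claim_equal_compress_by_file : Prop := ∀ (file_blocks : List (List String)), Dom_compress_by_file file_blocks → Pre_compress_by_file file_blocks → Spec_compress_by_file file_blocks (compress_by_file file_blocks)

-- ===== LEMMAS AND PROOFS =====

-- proof-side view of the free slots of the current list: (capacity, index) pairs, indices from i
def pvFreeFrom (i : Int) (cur : List (List String)) : List (Int × Int) :=
  match cur with
  | [] => []
  | b :: rest =>
      if pvHasDot (pvHead0 b) then (PySem.Str.len (pvHead0 b), i) :: pvFreeFrom (i + 1) rest
      else pvFreeFrom (i + 1) rest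

-- the indices of a bucket: free-slot indices of capacity c, in order
def pvGrp (free : List (Int × Int)) (c : Int) : List Int :=
  (free.filter (fun p => p.1 == c)).map (·.2)

-- the bucket dict represents exactly the grouping of the free list by capacity
def pvInv (d : PySem.Dict Int (List Int)) (free : List (Int × Int)) : Prop :=
  d.keys.Nodup ∧ (∀ c, d.getD c [] = pvGrp free c) ∧
    (∀ c, pvGrp free c ≠ [] → d.contains c = true)

lemma pvFreeFrom_eq (cur : List (List String)) : ∀ (i : Int),
    (PySem.List.enumerate cur i).filterMap
      (fun p => if pvHasDot (pvHead0 p.2) then some (PySem.Str.len (pvHead0 p.2), p.1) else none)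
      = pvFreeFrom i cur := by
  induction cur with
  | nil => intro i; simp [pvFreeFrom, PySem.List.enumerate_nil]
  | cons b rest ih =>
      intro i
      simp only [PySem.List.enumerate_cons, List.filterMap_cons, pvFreeFrom]
      by_cases h : pvHasDot (pvHead0 b) = true
      · simp only [h, if_pos]; rw [ih (i + 1)]
      · simp only [h, Bool.false_eq_true, if_false]; rw [ih (i + 1)]

lemma pvFreeFrom_idx_ge (cur : List (List String)) : ∀ (i : Int),
    ∀ p ∈ pvFreeFrom i cur, i ≤ p.2 := by
  induction cur with
  | nil => intro i p hp; simp [pvFreeFrom] at hp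
  | cons b rest ih =>
      intro i p hp
      simp only [pvFreeFrom] at hp
      split at hp
      · rcases List.mem_cons.1 hp with h | h
        · subst h; omega
        · have := ih (i + 1) p h; omega
      · have := ih (i + 1) p hp; omega

lemma pvFreeFrom_sorted (cur : List (List String)) : ∀ (i : Int),
    (pvFreeFrom i cur).Pairwise (fun p q => p.2 < q.2) := by
  induction cur with
  | nil => intro i; simp [pvFreeFrom]
  | cons b rest ih =>
      intro i
      simp only [pvFreeFrom]
      split
      · exact List.Pairwise.cons
          (fun q hq => by have := pvFreeFrom_idx_ge rest (i + 1) q hq; simp; omega) (ih (i + 1))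
      · exact ih (i + 1)

-- A's inner scan characterised by the free list: either nothing fits and nothing changes,
-- or the first fitting free slot (c, i+k) is consumed and position k is overwritten
lemma pvHead0_singleton (s : String) : pvHead0 [s] = s := by
  simp [pvHead0, PySem.List.pyGet?, PySem.List.pyIdx?]

lemma pvPlaceA_char (s : String) (hs : pvHasDot s = false) :
    ∀ (cur : List (List String)) (i : Int),
    ((∀ p ∈ pvFreeFrom i cur, ¬ PySem.Str.len s ≤ p.1) ∧ pvPlaceA cur s = cur)
    ∨ (∃ (k : Nat) (c : Int) (pre suf : List (Int × Int)),
        k < cur.length ∧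
        pvFreeFrom i cur = pre ++ (c, i + (k : Int)) :: suf ∧
        (∀ p ∈ pre, ¬ PySem.Str.len s ≤ p.1) ∧
        PySem.Str.len s ≤ c ∧
        pvPlaceA cur s = cur.set k [s] ∧
        pvFreeFrom i (cur.set k [s]) = pre ++ suf) := by
  intro cur
  induction cur with
  | nil => intro i; left; simp [pvFreeFrom, pvPlaceA]
  | cons b rest ih =>
      intro i
      by_cases hd : pvHasDot (pvHead0 b) = true
      · have hfe : pvFreeFrom i (b :: rest)
            = (PySem.Str.len (pvHead0 b), i) :: pvFreeFrom (i + 1) rest := by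
          simp [pvFreeFrom, hd]
        by_cases hl : PySem.Str.len s ≤ PySem.Str.len (pvHead0 b)
        · -- head slot fits: place at position 0
          have hl' : s.length ≤ (pvHead0 b).length := by simpa using hl
          right
          refine ⟨0, PySem.Str.len (pvHead0 b), [], pvFreeFrom (i + 1) rest,
            by simp, ?_, by simp, hl, ?_, ?_⟩
          · rw [hfe]; norm_num
          · simp only [pvPlaceA]
            rw [if_pos (by simp [hd, hl'])]
            simp [List.set_cons_zero]
          · simp only [List.set_cons_zero, pvFreeFrom, pvHead0_singleton, hs]
            simp
        · -- head slot too small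
          have hl' : ¬ s.length ≤ (pvHead0 b).length := by simpa using hl
          rcases ih (i + 1) with ⟨hno, hpl⟩ | ⟨k, c, pre, suf, hk, hfr, hpre, hc, hpl, hafter⟩
          · left
            constructor
            · intro p hp
              rw [hfe] at hp
              rcases List.mem_cons.1 hp with h | h
              · subst h; exact hl
              · exact hno p h
            · simp only [pvPlaceA]
              rw [if_neg (by simp [hl']), hpl]
          · right
            refine ⟨k + 1, c, (PySem.Str.len (pvHead0 b), i) :: pre, suf,
              by simpa using hk, ?_, ?_, hc, ?_, ?_⟩
            · rw [hfe, hfr, show (i + ((k + 1 : ℕ) : ℤ)) = i + 1 + (k : ℤ) by push_cast; ring]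
              simp [List.cons_append]
            · intro p hp
              rcases List.mem_cons.1 hp with h | h
              · subst h; exact hl
              · exact hpre p h
            · simp only [pvPlaceA]
              rw [if_neg (by simp [hl']), hpl]
              simp [List.set_cons_succ]
            · simp only [List.set_cons_succ, pvFreeFrom, hd, if_pos, hafter, List.cons_append]
      · -- head is a file: both sides skip it
        have hfe : pvFreeFrom i (b :: rest) = pvFreeFrom (i + 1) rest := by
          simp [pvFreeFrom, hd]
        have hnotb : ¬ ((decide (PySem.Str.len s ≤ PySem.Str.len (pvHead0 b))
            && pvHasDot (pvHead0 b)) = true) := by simp [hd]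
        rcases ih (i + 1) with ⟨hno, hpl⟩ | ⟨k, c, pre, suf, hk, hfr, hpre, hc, hpl, hafter⟩
        · left
          refine ⟨by rw [hfe]; exact hno, ?_⟩
          simp only [pvPlaceA]
          rw [if_neg hnotb, hpl]
        · right
          refine ⟨k + 1, c, pre, suf, by simpa using hk, ?_, hpre, hc, ?_, ?_⟩
          · rw [hfe, hfr, show (i + ((k + 1 : ℕ) : ℤ)) = i + 1 + (k : ℤ) by push_cast; ring]
          · simp only [pvPlaceA]
            rw [if_neg hnotb, hpl]
            simp [List.set_cons_succ]
          · simp only [List.set_cons_succ, pvFreeFrom, hd, Bool.false_eq_true, if_false, hafter]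

-- generic characterisation of the bucket query loop
lemma pvBestB_none (n : Int) : ∀ (items : List (Int × List Int)) (acc : Option (Int × Int)),
    pvBestB items n acc = none ↔ acc = none ∧ ∀ p ∈ items, n ≤ p.1 → p.2 = [] := by
  intro items
  induction items with
  | nil => intro acc; simp [pvBestB]
  | cons q rest ih =>
      intro acc
      obtain ⟨cap, idxs⟩ := q
      cases idxs with
      | nil =>
          simp only [pvBestB]
          rw [ih]
          simp
      | cons h t =>
          simp only [pvBestB]
          split_ifs with hif
          · rw [ih]
            have hcap : n ≤ cap := by
              have h' := hif
              simp only [Bool.and_eq_true, decide_eq_true_eq] at h'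
              exact h'.1
            simp [hcap]
          · cases acc with
            | none =>
                have hcap : ¬ n ≤ cap := by
                  intro hle
                  exact hif (by simp [hle])
                rw [ih]
                simp [hcap]
            | some b =>
                rw [ih]
                simp

lemma pvBestB_mem (n : Int) : ∀ (items : List (Int × List Int)) (acc : Option (Int × Int)) (r : Int × Int),
    pvBestB items n acc = some r →
    acc = some r ∨ ∃ l, (r.2, l) ∈ items ∧ l.head? = some r.1 ∧ n ≤ r.2 := by
  intro items
  induction items with
  | nil => intro acc r h; left; simpa [pvBestB] using h
  | cons q rest ih =>
      intro acc r h
      obtain ⟨cap, idxs⟩ := q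
      cases idxs with
      | nil =>
          simp only [pvBestB] at h
          rcases ih acc r h with h' | ⟨l, hl, hh, hn⟩
          · exact Or.inl h'
          · exact Or.inr ⟨l, List.mem_cons_of_mem _ hl, hh, hn⟩
      | cons hd t =>
          simp only [pvBestB] at h
          split_ifs at h with hif
          · rcases ih _ r h with h' | ⟨l, hl, hh, hn⟩
            · right
              obtain rfl : r = (hd, cap) := by injection h'.symm
              refine ⟨hd :: t, by simp, by simp, ?_⟩
              have h' := hif
              simp only [Bool.and_eq_true, decide_eq_true_eq] at h'
              exact h'.1
            · exact Or.inr ⟨l, List.mem_cons_of_mem _ hl, hh, hn⟩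
          · rcases ih acc r h with h' | ⟨l, hl, hh, hn⟩
            · exact Or.inl h'
            · exact Or.inr ⟨l, List.mem_cons_of_mem _ hl, hh, hn⟩

lemma pvBestB_min (n : Int) : ∀ (items : List (Int × List Int)) (acc : Option (Int × Int)) (r : Int × Int),
    pvBestB items n acc = some r →
    (∀ b, acc = some b → r.1 ≤ b.1) ∧
    (∀ p ∈ items, n ≤ p.1 → ∀ h, p.2.head? = some h → r.1 ≤ h) := by
  intro items
  induction items with
  | nil =>
      intro acc r h
      simp only [pvBestB] at h
      subst h
      refine ⟨fun b hb => by injection hb with hb'; rw [hb'], ?_⟩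
      intro p hp
      simp at hp
  | cons q rest ih =>
      intro acc r h
      obtain ⟨cap, idxs⟩ := q
      cases idxs with
      | nil =>
          simp only [pvBestB] at h
          obtain ⟨hacc, hrest⟩ := ih acc r h
          refine ⟨hacc, fun p hp hn hh hhd => ?_⟩
          rcases List.mem_cons.1 hp with h' | h'
          · subst h'; simp at hhd
          · exact hrest p h' hn hh hhd
      | cons hd t =>
          simp only [pvBestB] at h
          split_ifs at h with hif
          · obtain ⟨hacc', hrest⟩ := ih _ r h
            have hrhd : r.1 ≤ hd := hacc' (hd, cap) rfl
            constructor
            · intro b hb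
              subst hb
              have h' := hif
              simp only [Bool.and_eq_true, decide_eq_true_eq] at h'
              have : hd < b.1 := h'.2
              omega
            · intro p hp hn hh hhd
              rcases List.mem_cons.1 hp with h' | h'
              · subst h'
                simp only [List.head?_cons, Option.some.injEq] at hhd
                omega
              · exact hrest p h' hn hh hhd
          · obtain ⟨hacc, hrest⟩ := ih acc r h
            constructor
            · exact hacc
            · intro p hp hn hh hhd
              rcases List.mem_cons.1 hp with h' | h'
              · subst h'
                simp only at hn
                simp only [List.head?_cons, Option.some.injEq] at hhd
                -- the if failed although the bucket fits and is nonempty: acc must be some b with b.1 ≤ hd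
                cases acc with
                | none => exact absurd (by simp [hn]) hif
                | some b =>
                    have hble : b.1 ≤ hd := by
                      by_contra hlt
                      refine hif ?_
                      simp only [hn, decide_true, Bool.true_and]
                      exact decide_eq_true (by omega)
                    have := hacc b rfl
                    omega
              · exact hrest p h' hn hh hhd

-- grouping distributes over the shape of the free list
lemma pvGrp_append (u v : List (Int × Int)) (c : Int) :
    pvGrp (u ++ v) c = pvGrp u c ++ pvGrp v c := by
  simp [pvGrp, List.filter_append]

lemma pvGrp_cons (p : Int × Int) (v : List (Int × Int)) (c : Int) :
    pvGrp (p :: v) c = if p.1 = c then p.2 :: pvGrp v c else pvGrp v c := by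
  by_cases h : p.1 = c <;> simp [pvGrp, h]

lemma mem_pvGrp (free : List (Int × Int)) (c j : Int) :
    j ∈ pvGrp free c ↔ (c, j) ∈ free := by
  simp only [pvGrp, List.mem_map, List.mem_filter, beq_iff_eq]
  constructor
  · rintro ⟨⟨a, b⟩, ⟨hmem, hc⟩, hj⟩
    simp only at hc hj
    subst hc; subst hj
    exact hmem
  · intro h
    exact ⟨(c, j), ⟨h, rfl⟩, rfl⟩

-- the query returns exactly the first fitting free slot
lemma pvQuery_none (d : PySem.Dict Int (List Int)) (free : List (Int × Int)) (n : Int)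
    (hinv : pvInv d free) (hnofit : ∀ p ∈ free, ¬ n ≤ p.1) :
    pvBestB d.items n none = none := by
  obtain ⟨hnd, hgetD, _⟩ := hinv
  rw [pvBestB_none]
  refine ⟨rfl, ?_⟩
  rintro ⟨c, l⟩ hp hn
  have hl : l = pvGrp free c := by
    rw [← hgetD c]
    exact (PySem.Dict.getD_of_mem_items _ hp hnd []).symm
  by_contra hne
  obtain ⟨j, hj⟩ := List.exists_mem_of_ne_nil _ hne
  rw [hl, mem_pvGrp] at hj
  exact hnofit (c, j) hj hn

lemma pvQuery_some (d : PySem.Dict Int (List Int)) (free : List (Int × Int)) (n : Int)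
    (hinv : pvInv d free) (hsorted : free.Pairwise (fun p q => p.2 < q.2))
    (pre suf : List (Int × Int)) (c j : Int)
    (hfree : free = pre ++ (c, j) :: suf)
    (hpre : ∀ p ∈ pre, ¬ n ≤ p.1) (hc : n ≤ c) :
    pvBestB d.items n none = some (j, c) := by
  obtain ⟨hnd, hgetD, hcont⟩ := hinv
  -- pre contains no capacity-c slots (they would fit)
  have hgrp_pre : pvGrp pre c = [] := by
    rw [List.eq_nil_iff_forall_not_mem]
    intro x hx
    rw [mem_pvGrp] at hx
    exact hpre (c, x) hx hc
  have hgrpc : pvGrp free c = j :: pvGrp suf c := by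
    rw [hfree, pvGrp_append, hgrp_pre, pvGrp_cons]
    simp
  -- (c, pvGrp free c) is an entry of the dict
  have hcontc : d.contains c = true := hcont c (by rw [hgrpc]; simp)
  obtain ⟨l, hgetc⟩ : ∃ l, d.get? c = some l := by
    have := PySem.Dict.contains_eq_isSome_get? (d := d) (k := c)
    rw [hcontc] at this
    exact Option.isSome_iff_exists.1 this.symm
  have hlc : l = pvGrp free c := by
    rw [← hgetD c, PySem.Dict.getD_eq_get?_getD, hgetc]
    rfl
  have hitems : (c, pvGrp free c) ∈ d.items := by
    rw [← hlc]
    exact PySem.Dict.mem_items_of_get?_eq_some _ hgetc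
  -- every fitting free slot has index ≥ j
  have hjmin : ∀ p ∈ free, n ≤ p.1 → j ≤ p.2 := by
    intro p hp hn
    rw [hfree] at hp
    rcases List.mem_append.1 hp with h | h
    · exact absurd hn (hpre p h)
    · rcases List.mem_cons.1 h with h' | h'
      · rw [h']
      · have hsub : ((c, j) :: suf).Pairwise (fun p q => p.2 < q.2) :=
          (hsorted.sublist (by rw [hfree]; exact List.sublist_append_right _ _))
        have := (List.pairwise_cons.1 hsub).1 p h'
        omega
  -- indices determine the free-list entry
  have hidx_nodup : (free.map (fun p => p.2)).Nodup := by
    rw [List.nodup_iff_pairwise_ne]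
    exact List.pairwise_map.2 (hsorted.imp (fun hlt => ne_of_lt hlt))
  cases hr : pvBestB d.items n none with
  | none =>
      rw [pvBestB_none] at hr
      have := hr.2 (c, pvGrp free c) hitems hc
      rw [hgrpc] at this
      exact absurd this (by simp)
  | some r =>
      obtain ⟨r1, r2⟩ := r
      rcases pvBestB_mem n d.items none (r1, r2) hr with h' | ⟨l', hl', hh', hn'⟩
      · exact absurd h'.symm (by simp)
      · simp only at hl' hh' hn'
        have hl'g : l' = pvGrp free r2 := by
          rw [← hgetD r2]
          exact (PySem.Dict.getD_of_mem_items _ hl' hnd []).symm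
        have hr1mem : (r2, r1) ∈ free := by
          rw [← mem_pvGrp, ← hl'g]
          exact List.mem_of_mem_head? hh'
        have hjr : j ≤ r1 := hjmin (r2, r1) hr1mem hn'
        have hrj : r1 ≤ j := by
          have := (pvBestB_min n d.items none (r1, r2) hr).2 (c, pvGrp free c) hitems hc j
            (by simp [hgrpc])
          simpa using this
        have hr1 : r1 = j := le_antisymm hrj hjr
        have hcj : (c, j) ∈ free := by rw [hfree]; simp
        have heq : (r2, r1) = (c, j) :=
          List.inj_on_of_nodup_map hidx_nodup hr1mem hcj (by simpa using hr1)
        have hr2 : r2 = c := by injection heq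
        rw [hr1, hr2]

-- popping the consumed bucket head keeps the invariant
lemma pvInv_update (d : PySem.Dict Int (List Int)) (pre suf : List (Int × Int)) (c j n : Int)
    (hinv : pvInv d (pre ++ (c, j) :: suf))
    (hpre : ∀ p ∈ pre, ¬ n ≤ p.1) (hc : n ≤ c) :
    pvInv (d.modify c [] (fun l => l.drop 1)) (pre ++ suf) := by
  obtain ⟨hnd, hgetD, hcont⟩ := hinv
  have hgrp_pre : pvGrp pre c = [] := by
    rw [List.eq_nil_iff_forall_not_mem]
    intro x hx
    rw [mem_pvGrp] at hx
    exact hpre (c, x) hx hc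
  have hcontc : d.contains c = true := by
    refine hcont c ?_
    rw [pvGrp_append, hgrp_pre, pvGrp_cons]
    simp
  refine ⟨?_, ?_, ?_⟩
  · rw [PySem.Dict.keys_modify, PySem.Dict.keys_insert_of_contains _ _ hcontc]
    exact hnd
  · intro c'
    rw [PySem.Dict.getD_modify]
    by_cases hcc : c' = c
    · subst hcc
      rw [if_pos rfl, hgetD c', pvGrp_append, pvGrp_append, hgrp_pre, pvGrp_cons]
      simp
    · rw [if_neg hcc, hgetD c', pvGrp_append, pvGrp_append, pvGrp_cons]
      simp only [Ne.symm hcc, if_false]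
  · intro c' hne
    rw [PySem.Dict.contains_modify]
    by_cases hcc : c' = c
    · simp [hcc]
    · refine Bool.or_eq_true_iff.2 (Or.inr (hcont c' ?_))
      rw [pvGrp_append, pvGrp_cons]
      simp only [Ne.symm hcc, if_false]
      rw [pvGrp_append] at hne
      exact hne

-- the initial bucket build establishes the invariant
lemma pvInv_init (free : List (Int × Int)) :
    pvInv (free.foldl (fun d p => d.modify p.1 [] (fun l => l ++ [p.2])) PySem.Dict.empty) free := by
  refine ⟨?_, ?_, ?_⟩
  · exact PySem.Dict.nodup_keys_foldl_modify_key free (fun p => p.1) _ _ PySem.Dict.empty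
      PySem.Dict.nodup_keys_empty
  · intro c
    rw [PySem.Dict.getD_foldl_modify_append, PySem.Dict.getD_empty]
    rfl
  · intro c hne
    rw [PySem.Dict.contains_iff_mem_keys, PySem.Dict.keys_foldl_modify_key]
    refine (PySem.Set.mem_update _ _ _).2 (Or.inr ?_)
    obtain ⟨x, hx⟩ := List.exists_mem_of_ne_nil _ hne
    rw [mem_pvGrp] at hx
    exact List.mem_map.2 ⟨(c, x), hx, rfl⟩

-- the main loop: A's list state equals B's list state, B's dict groups the free slots
lemma pvMain_loop :
    ∀ (L cur : List (List String)) (d : PySem.Dict Int (List Int)),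
    pvInv d (pvFreeFrom 0 cur) →
    L.foldl (fun cur blk =>
        let s := pvHead0 blk
        if pvHasDot s then cur else pvPlaceA cur s) cur
    = (L.foldl (fun (st : PySem.Dict Int (List Int) × List (List String)) blk =>
          let s := pvHead0 blk
          if pvHasDot s then st
          else
            match pvBestB st.1.items (PySem.Str.len s) none with
            | none => st
            | some (j, c) => (st.1.modify c [] (fun l => l.drop 1), PySem.List.pySetD st.2 j [s]))
        (d, cur)).2 := by
  intro L
  induction L with
  | nil => intro cur d _; rfl
  | cons blk L ih =>
      intro cur d hinv
      simp only [List.foldl_cons]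
      by_cases hdot : pvHasDot (pvHead0 blk) = true
      · simp only [hdot, if_pos]
        exact ih cur d hinv
      · simp only [hdot, Bool.false_eq_true, if_false]
        rcases pvPlaceA_char (pvHead0 blk) (by simpa using hdot) cur 0 with
          ⟨hnofit, hpl⟩ | ⟨k, c, pre, suf, hk, hfr, hpre, hc, hpl, hafter⟩
        · rw [pvQuery_none d (pvFreeFrom 0 cur) (PySem.Str.len (pvHead0 blk)) hinv hnofit, hpl]
          exact ih cur d hinv
        · have hq : pvBestB d.items (PySem.Str.len (pvHead0 blk)) none = some (0 + (k : Int), c) :=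
            pvQuery_some d (pvFreeFrom 0 cur) (PySem.Str.len (pvHead0 blk)) hinv
              (pvFreeFrom_sorted cur 0) pre suf c (0 + (k : Int)) hfr hpre hc
          have hset : PySem.List.pySetD cur (0 + (k : Int)) [pvHead0 blk] = cur.set k [pvHead0 blk] := by
            rw [show (0 + (k : Int)) = ((k : Nat) : Int) by omega]
            exact PySem.List.pySetD_natCast cur k [pvHead0 blk]
          simp only [hq, hpl, hset]
          refine ih (cur.set k [pvHead0 blk]) (d.modify c [] (fun l => l.drop 1)) ?_
          rw [hafter]
          rw [hfr] at hinv
          exact pvInv_update d pre suf c (0 + (k : Int)) (PySem.Str.len (pvHead0 blk)) hinv hpre hc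

-- ===== VERDICT (by name: the statement is the Claim_ definition above) =====
theorem compress_by_file_spec : Claim_equal_compress_by_file := by
  intro fbs _ _
  unfold Spec_compress_by_file compress_by_file compress_by_file_alt
  rw [PySem.List.slice?_none_none_neg_one]
  simp only [Option.getD_some]
  rw [pvFreeFrom_eq fbs 0]
  exact pvMain_loop fbs.reverse fbs _ (pvInv_init (pvFreeFrom 0 fbs))
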